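-- pv_equiv track=rewrite | github.com/RafailTn/msc-thesis | src/feature_extraction.py | _mre_pos_map
-- ===== SOURCE A (Python) =====
-- from typing import Dict, List, Optional
--
-- def _mre_pos_map(vec: str) -> Dict[int, Optional[int]]:
--     """vector-index → 0-indexed MRE position within the binding region."""
--     m: Dict[int, Optional[int]] = {}
--     pos = 0
--     for idx, ch in enumerate(vec):
--         if ch in '123De':
--             m[idx] = pos; pos += 1
--         elif ch in '4d':
--             m[idx] = None
--         else:
--             m[idx] = pos
--     return m
-- ===== SOURCE B (Python) =====
-- from itertools import accumulate
-- from typing import Dict, Optional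
--
-- def _mre_pos_map(vec: str) -> Dict[int, Optional[int]]:
--     """vector-index -> 0-indexed MRE position within the binding region."""
--     flags = [1 if ch in '123De' else 0 for ch in vec]
--     positions = list(accumulate(flags, initial=0))[:-1]  # exclusive prefix sums
--     return {idx: (None if ch in '4d' else positions[idx])
--             for idx, ch in enumerate(vec)}
-- ===== Notes on version B (the rewrite author's own statement) =====
-- stated objective: alternative
-- what changed: Replaced the single running-counter loop by a two-pass prefix-sum formulation: a flag list, exclusive prefix sums into a positions table, and a dict comprehension reading the table.
import Mathlib
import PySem

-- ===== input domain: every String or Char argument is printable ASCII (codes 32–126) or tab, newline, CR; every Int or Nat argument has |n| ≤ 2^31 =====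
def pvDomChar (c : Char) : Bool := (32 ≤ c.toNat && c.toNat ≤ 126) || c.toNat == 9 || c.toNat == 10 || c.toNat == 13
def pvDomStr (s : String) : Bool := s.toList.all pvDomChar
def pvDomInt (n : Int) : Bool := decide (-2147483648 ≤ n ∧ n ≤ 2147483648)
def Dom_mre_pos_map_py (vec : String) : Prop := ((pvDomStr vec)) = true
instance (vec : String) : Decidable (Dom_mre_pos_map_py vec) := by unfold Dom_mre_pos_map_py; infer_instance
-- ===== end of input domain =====

-- B replaces A's running-counter loop by a prefix-sum table plus a mapping pass (alternative decomposition, same cost).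

-- ===== PORT A =====
def mreStepA (st : PySem.Dict Int (Option Int) × Int) (p : Int × Char) :
    PySem.Dict Int (Option Int) × Int :=
  if p.2 ∈ ['1', '2', '3', 'D', 'e'] then (st.1.insert p.1 (some st.2), st.2 + 1)
  else if p.2 ∈ ['4', 'd'] then (st.1.insert p.1 none, st.2)
  else (st.1.insert p.1 (some st.2), st.2)

def mre_pos_map_py (vec : String) : List (Int × Option Int) :=
  (((PySem.List.enumerate vec.toList).foldl mreStepA (PySem.Dict.empty, 0)).1).items

-- ===== PORT B =====
def mreFlag (ch : Char) : Int := if ch ∈ ['1', '2', '3', 'D', 'e'] then 1 else 0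

def mre_pos_map_py_alt (vec : String) : List (Int × Option Int) :=
  let chars := vec.toList
  let flags : List Int := chars.map mreFlag
  let positions : List Int := ((flags.scanl (· + ·) 0)).dropLast
  ((PySem.List.enumerate chars).zip positions).map
    (fun p => (p.1.1, if p.1.2 ∈ ['4', 'd'] then none else some p.2))

-- ===== PRECONDITION & SPEC =====
def Spec_mre_pos_map_py (vec : String) (out : List (Int × Option Int)) : Prop := out = mre_pos_map_py_alt vec
instance (vec : String) (out : List (Int × Option Int)) : Decidable (Spec_mre_pos_map_py vec out) := by unfold Spec_mre_pos_map_py; infer_instance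

-- ===== CLAIM (what is proved, stated in full; the proofs are below) =====
def Claim_equal_mre_pos_map_py : Prop := ∀ (vec : String), Dom_mre_pos_map_py vec → Spec_mre_pos_map_py vec (mre_pos_map_py vec)

-- ===== LEMMAS AND PROOFS =====

lemma scanl_ne_nil (f : Int → Int → Int) (a : Int) (l : List Int) :
    l.scanl f a ≠ [] := by
  cases l <;> simp [List.scanl]

lemma mre_loop (chars : List Char) : ∀ (s pos : Int) (m : PySem.Dict Int (Option Int)),
    (∀ k ∈ m.keys, k < s) →
    (((PySem.List.enumerate chars s).foldl mreStepA (m, pos)).1).items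
      = m.items ++
        ((PySem.List.enumerate chars s).zip (((chars.map mreFlag).scanl (· + ·) pos)).dropLast).map
          (fun p => (p.1.1, if p.1.2 ∈ ['4', 'd'] then none else some p.2)) := by
  induction chars with
  | nil => intro s pos m _; simp [PySem.List.enumerate_nil]
  | cons c cs ih =>
    intro s pos m hm
    have hnc : m.contains s = false := by
      by_contra h
      have : s ∈ m.keys := by
        have := PySem.Dict.contains_iff_mem_keys (d := m) (k := s)
        exact this.mp (by simpa using h)
      exact absurd (hm s this) (lt_irrefl s)
    have hins : ∀ (v : Option Int), (m.insert s v).items = m.items ++ [(s, v)] := fun v =>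
      PySem.Dict.items_insert_of_not_contains _ _ hnc
    have hkeys : ∀ (v : Option Int) (k : Int), k ∈ (m.insert s v).keys → k < s + 1 := by
      intro v k hk
      rcases (PySem.Dict.mem_keys_insert _ _ _ _).mp hk with h | h
      · omega
      · have := hm k h; omega
    have hdl : ∀ (a : Int) (l : List Int),
        ((a :: l).scanl (· + ·) pos).dropLast
          = pos :: ((l.scanl (· + ·) (pos + a)).dropLast) := by
      intro a l
      have : (a :: l).scanl (· + ·) pos = pos :: l.scanl (· + ·) (pos + a) := by
        simp [List.scanl]
      rw [this, List.dropLast_cons_of_ne_nil (scanl_ne_nil _ _ _)]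
    rw [PySem.List.enumerate_cons]
    simp only [List.map_cons, List.foldl_cons]
    by_cases h1 : c ∈ ['1', '2', '3', 'D', 'e']
    · have h4 : c ∉ ['4', 'd'] := by
        simp only [List.mem_cons, List.not_mem_nil, or_false] at h1 ⊢
        rcases h1 with h | h | h | h | h <;> rw [h] <;> decide
      rw [show mreStepA (m, pos) (s, c) = (m.insert s (some pos), pos + 1) by
        simp [mreStepA, h1]]
      rw [ih (s + 1) (pos + 1) _ (hkeys _), hins, hdl]
      (simp only [List.mem_cons, List.not_mem_nil, or_false] at h4; simp [mreFlag, h1, List.zip_cons_cons]; tauto)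
    · by_cases h4 : c ∈ ['4', 'd']
      · rw [show mreStepA (m, pos) (s, c) = (m.insert s none, pos) by
          simp [mreStepA, h1, h4]]
        rw [ih (s + 1) pos _ (hkeys _), hins, hdl]
        (simp only [List.mem_cons, List.not_mem_nil, or_false] at h4; simp [mreFlag, h1, List.zip_cons_cons]; tauto)
      · rw [show mreStepA (m, pos) (s, c) = (m.insert s (some pos), pos) by
          simp [mreStepA, h1, h4]]
        rw [ih (s + 1) pos _ (hkeys _), hins, hdl]
        (simp only [List.mem_cons, List.not_mem_nil, or_false] at h4; simp [mreFlag, h1, List.zip_cons_cons]; tauto)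

-- ===== VERDICT (by name: the statement is the Claim_ definition above) =====
theorem mre_pos_map_py_spec : Claim_equal_mre_pos_map_py := by
  intro vec _
  unfold Spec_mre_pos_map_py mre_pos_map_py mre_pos_map_py_alt
  rw [mre_loop vec.toList 0 0 PySem.Dict.empty (by simp [PySem.Dict.empty])]
  simp [PySem.Dict.empty]
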